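-- pv_equiv track=rewrite | github.com/2022neo/ger_ump_cp | functions.py | find_second_occurrence
-- ===== SOURCE A (Python) =====
-- def find_second_occurrence(lst, value):
--     count = 0
--     for index, item in enumerate(lst):
--         if item == value:
--             count += 1
--             if count == 2:
--                 return index
--     return len(lst)
-- ===== SOURCE B (Python) =====
-- def find_second_occurrence(lst, value):
--     try:
--         first = lst.index(value)
--         return lst.index(value, first + 1)
--     except ValueError:
--         return len(lst)
-- ===== Notes on version B (the rewrite author's own statement) =====
-- stated objective: idiomatic
-- what changed: Replaces the counting scan with two staged library searches: lst.index finds the first occurrence, a second lst.index with a start offset finds the next one, and a ValueError fallback yields len(lst).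
import Mathlib
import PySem

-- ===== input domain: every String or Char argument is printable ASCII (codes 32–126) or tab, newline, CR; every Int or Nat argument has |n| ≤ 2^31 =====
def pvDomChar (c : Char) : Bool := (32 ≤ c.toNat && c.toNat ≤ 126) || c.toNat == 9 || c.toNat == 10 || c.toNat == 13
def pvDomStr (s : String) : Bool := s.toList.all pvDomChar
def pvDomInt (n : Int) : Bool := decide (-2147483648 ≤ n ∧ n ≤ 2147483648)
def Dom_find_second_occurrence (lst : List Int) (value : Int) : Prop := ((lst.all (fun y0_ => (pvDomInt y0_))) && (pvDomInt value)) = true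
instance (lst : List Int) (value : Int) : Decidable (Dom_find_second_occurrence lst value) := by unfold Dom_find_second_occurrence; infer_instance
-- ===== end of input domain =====

-- B replaces A's counting scan with two staged library searches (index of first match, then index from first+1), same O(n) cost; return-value equivalence only.


-- ===== PORT A =====
-- Early-exit counting scan: counter, return index on the second match, len(lst) otherwise.
def fsoLoop (l : List Int) (value : Int) (count : Int) (index : Int) : Option Int :=
  match l with
  | [] => none
  | item :: rest =>
    if item = value then
      if count + 1 = 2 then some index
      else fsoLoop rest value (count + 1) (index + 1)
    else fsoLoop rest value count (index + 1)

def find_second_occurrence (lst : List Int) (value : Int) : Int :=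
  match fsoLoop lst value 0 0 with
  | some i => i
  | none => (lst.length : Int)

-- ===== PORT B =====
-- Two staged searches: first = lst.index(value); then lst.index(value, first+1)
-- (ported as a search over lst.drop (first+1) plus the offset); ValueError → len(lst).
def find_second_occurrence_alt (lst : List Int) (value : Int) : Int :=
  match PySem.List.index? lst value with
  | none => (lst.length : Int)
  | some f =>
    match PySem.List.index? (lst.drop (f + 1)) value with
    | none => (lst.length : Int)
    | some j => ((f + 1 + j : Nat) : Int)

-- ===== PRECONDITION & SPEC =====
def Spec_find_second_occurrence (lst : List Int) (value : Int) (out : Int) : Prop := out = find_second_occurrence_alt lst value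
instance (lst : List Int) (value : Int) (out : Int) : Decidable (Spec_find_second_occurrence lst value out) := by unfold Spec_find_second_occurrence; infer_instance

-- ===== CLAIM =====
def Claim_equal_find_second_occurrence : Prop := ∀ (lst : List Int) (value : Int), Dom_find_second_occurrence lst value → Spec_find_second_occurrence lst value (find_second_occurrence lst value)

-- ===== LEMMAS AND PROOFS =====

theorem fsoLoop_one (lst : List Int) (value : Int) (s : Int) :
    fsoLoop lst value 1 s = (PySem.List.index? lst value).map (fun j => s + (j:Int)) := by
  induction lst generalizing s with
  | nil => simp [fsoLoop, PySem.List.index?_eq_idxOf?]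
  | cons x rest ih =>
    by_cases h : x = value
    · subst h
      rw [PySem.List.index?_cons_self]
      simp [fsoLoop]
    · rw [PySem.List.index?_cons_of_ne rest h]
      simp only [fsoLoop, if_neg h, ih]
      cases PySem.List.index? rest value <;> simp <;> omega

theorem fsoLoop_zero (lst : List Int) (value : Int) (s : Int) :
    fsoLoop lst value 0 s =
      match PySem.List.index? lst value with
      | none => none
      | some f => (PySem.List.index? (lst.drop (f + 1)) value).map
          (fun j => s + ((f + 1 + j : Nat) : Int)) := by
  induction lst generalizing s with
  | nil => simp [fsoLoop, PySem.List.index?_eq_idxOf?]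
  | cons x rest ih =>
    by_cases h : x = value
    · subst h
      rw [PySem.List.index?_cons_self]
      simp only [fsoLoop]
      norm_num
      rw [fsoLoop_one]
      cases hi : List.idxOf? x rest <;>
        (simp [PySem.List.index?_eq_idxOf?, hi]; try omega)
    · rw [PySem.List.index?_cons_of_ne rest h]
      simp only [fsoLoop, if_neg h, ih]
      cases hf : PySem.List.index? rest value with
      | none => simp
      | some f =>
        simp only [Option.map_some]
        have hd : (x :: rest).drop (f + 1 + 1) = rest.drop (f + 1) := by
          simp [List.drop_succ_cons]
        rw [hd]
        cases PySem.List.index? (rest.drop (f + 1)) value <;> simp <;> push_cast <;> omega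

-- ===== VERDICT =====
theorem find_second_occurrence_spec : Claim_equal_find_second_occurrence := by
  intro lst value _
  unfold Spec_find_second_occurrence find_second_occurrence find_second_occurrence_alt
  rw [fsoLoop_zero]
  cases hf : PySem.List.index? lst value with
  | none => simp
  | some f =>
    cases hj : List.idxOf? value (lst.drop (f + 1)) <;>
      (simp [PySem.List.index?_eq_idxOf?, hj]; try omega)
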